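-- pv_equiv track=rewrite | github.com/yakimka/advent_of_code_2024 | day01/part2.py | compute
-- ===== SOURCE A (Python) =====
-- from collections import Counter
--
-- def compute(s: str) -> int:
--     left = []
--     right = Counter()
--     for line in s.splitlines():
--         if not line.strip():
--             continue
--         a, b = map(int, line.split("   "))
--         left.append(a)
--         right[b] += 1
--
--     total = 0
--     for loc_id in left:
--         total += loc_id * right[loc_id]
--     return total
-- ===== SOURCE B (Python) =====
-- def compute(s: str) -> int:
--     left = []
--     right = []
--     for line in s.splitlines():
--         if not line.strip():
--             continue
--         a, b = map(int, line.split("   "))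
--         left.append(a)
--         right.append(b)
--     left.sort()
--     right.sort()
--     total = 0
--     i, j = 0, 0
--     n, m = len(left), len(right)
--     while i < n and j < m:
--         if left[i] < right[j]:
--             i += 1
--         elif right[j] < left[i]:
--             j += 1
--         else:
--             v = left[i]
--             i0, j0 = i, j
--             while i < n and left[i] == v:
--                 i += 1
--             while j < m and right[j] == v:
--                 j += 1
--             total += v * (i - i0) * (j - j0)
--     return total
-- ===== Notes on version B (the rewrite author's own statement) =====
-- stated objective: alternative
-- what changed: B drops the Counter entirely: it collects both columns into plain lists, sorts them, and computes the total with a two-pointer merge over runs of equal values (sum of v * leftRun * rightRun), instead of A's hash-count plus a second pass over every left id.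
import Mathlib
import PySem

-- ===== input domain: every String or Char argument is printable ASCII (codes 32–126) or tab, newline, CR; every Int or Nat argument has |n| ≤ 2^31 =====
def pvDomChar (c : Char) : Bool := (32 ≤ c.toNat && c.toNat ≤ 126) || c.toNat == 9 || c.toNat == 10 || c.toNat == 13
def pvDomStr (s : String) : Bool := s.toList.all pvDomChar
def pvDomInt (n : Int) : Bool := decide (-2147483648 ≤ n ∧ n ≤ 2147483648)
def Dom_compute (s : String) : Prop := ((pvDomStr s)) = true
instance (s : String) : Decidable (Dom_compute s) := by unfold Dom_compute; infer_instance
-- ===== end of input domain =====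

-- B replaces A's Counter lookup pass by sorting both columns and a two-pointer merge over
-- runs of equal values (alternative algorithm: sort-and-merge instead of hash counting).


-- ===== PORT A =====
-- shared by both ports: the line parser: split on three spaces, both pieces through int(); none = the line where Python raises
def parseLine? (line : String) : Option (Int × Int) :=
  match PySem.Str.split? line "   " with
  | some parts =>
    match parts.map PySem.Int.ofStr? with
    | [some a, some b] => some (a, b)
    | _ => none
  | none => none

def compute (s : String) : Int :=
  let st := (PySem.Str.splitlines s).foldl (fun st line =>
    if PySem.Str.strip line = "" then st
    else
      match parseLine? line with
      | some (a, b) => (st.1 ++ [a], st.2.modify b 0 (· + 1))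
      | none => st) (([] : List Int), (PySem.Dict.empty : PySem.Dict Int Int))
  st.1.foldl (fun total locId => total + locId * st.2.getD locId 0) 0

-- ===== PORT B =====
-- the while loop over the two sorted lists: pointers become structural consumption of the lists;
-- the inner run-advancing whiles become takeWhile/dropWhile of the current value
def mergeRuns : List Int → List Int → Int
  | [], _ => 0
  | _ :: _, [] => 0
  | a :: l, b :: r =>
    if a < b then mergeRuns l (b :: r)
    else if b < a then mergeRuns (a :: l) r
    else
      a * (((a :: l).takeWhile (fun x => x == a)).length : Int)
          * (((b :: r).takeWhile (fun x => x == b)).length : Int)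
        + mergeRuns ((a :: l).dropWhile (fun x => x == a)) ((b :: r).dropWhile (fun x => x == b))
termination_by l r => l.length + r.length
decreasing_by
  · simp
  · simp
  · have h1 : (List.dropWhile (fun x => x == a) l).length ≤ l.length :=
      List.length_dropWhile_le _ _
    have h2 : (List.dropWhile (fun x => x == b) r).length ≤ r.length :=
      List.length_dropWhile_le _ _
    simp; omega

def compute_alt (s : String) : Int :=
  let st := (PySem.Str.splitlines s).foldl (fun st line =>
    if PySem.Str.strip line = "" then st
    else
      match parseLine? line with
      | some (a, b) => (st.1 ++ [a], st.2 ++ [b])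
      | none => st) (([] : List Int), ([] : List Int))
  mergeRuns (PySem.List.sorted st.1 (fun x => x) false) (PySem.List.sorted st.2 (fun x => x) false)

-- ===== PRECONDITION & SPEC =====
-- Pre_ excludes exactly the inputs where A raises ValueError: a non-blank line that does not
-- split on the three-space separator into exactly two int()-parseable pieces.
def Pre_compute (s : String) : Prop :=
  ((PySem.Str.splitlines s).all (fun line =>
    (PySem.Str.strip line == "") ||
    (match PySem.Str.split? line "   " with
     | some parts => parts.length == 2 && parts.all (fun p => (PySem.Int.ofStr? p).isSome)
     | none => false))) = true
instance (s : String) : Decidable (Pre_compute s) := by unfold Pre_compute; infer_instance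
def pvWitness_compute : String := "1   2\n2   4\n\n2   2"

def Spec_compute (s : String) (out : Int) : Prop := out = compute_alt s
instance (s : String) (out : Int) : Decidable (Spec_compute s out) := by unfold Spec_compute; infer_instance

-- ===== CLAIM (what is proved, stated in full; the proofs are below) =====
def Claim_equal_compute : Prop := ∀ (s : String), Dom_compute s → Pre_compute s → Spec_compute s (compute s)

-- ===== LEMMAS AND PROOFS =====

-- the (a, b) pairs of the non-blank lines, in order
def pvPairs (lines : List String) : List (Int × Int) :=
  lines.filterMap (fun line => if PySem.Str.strip line = "" then none else parseLine? line)

theorem pvFoldA (lines : List String) (l : List Int) (d : PySem.Dict Int Int) :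
    lines.foldl (fun st line =>
      if PySem.Str.strip line = "" then st
      else
        match parseLine? line with
        | some (a, b) => (st.1 ++ [a], st.2.modify b 0 (· + 1))
        | none => st) (l, d)
    = (l ++ ((pvPairs lines).map Prod.fst),
       ((pvPairs lines).map Prod.snd).foldl (fun d b => d.modify b 0 (· + 1)) d) := by
  induction lines generalizing l d with
  | nil => simp [pvPairs]
  | cons line rest ih =>
    by_cases h : PySem.Str.strip line = ""
    · simp [pvPairs, h, ih]
    · cases hp : parseLine? line with
      | none => simp [pvPairs, h, hp, ih]
      | some ab => simp [pvPairs, h, hp, ih]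

theorem pvFoldB (lines : List String) (l r : List Int) :
    lines.foldl (fun st line =>
      if PySem.Str.strip line = "" then st
      else
        match parseLine? line with
        | some (a, b) => (st.1 ++ [a], st.2 ++ [b])
        | none => st) (l, r)
    = (l ++ ((pvPairs lines).map Prod.fst), r ++ ((pvPairs lines).map Prod.snd)) := by
  induction lines generalizing l r with
  | nil => simp [pvPairs]
  | cons line rest ih =>
    by_cases h : PySem.Str.strip line = ""
    · simp [pvPairs, h, ih]
    · cases hp : parseLine? line with
      | none => simp [pvPairs, h, hp, ih]
      | some ab => simp [pvPairs, h, hp, ih]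

theorem pvCountA (R : List Int) (a : Int) :
    ((R.foldl (fun d b => d.modify b 0 (· + 1)) (PySem.Dict.empty : PySem.Dict Int Int)).getD a 0)
      = (R.count a : Int) := by
  rw [PySem.Dict.getD_foldl_modify_add_one]; simp

-- elements surviving dropWhile (== v) in a list whose elements are all ≥ v are > v
theorem pvDropGt (v : Int) (xs : List Int) (hs : xs.Pairwise (· ≤ ·))
    (hv : ∀ x ∈ xs, v ≤ x) : ∀ x ∈ xs.dropWhile (fun x => x == v), v < x := by
  induction xs with
  | nil => simp
  | cons y ys ih =>
    by_cases hy : y = v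
    · subst hy
      simp only [List.dropWhile_cons, beq_self_eq_true]
      exact ih hs.tail (fun x hx => hv x (List.mem_cons_of_mem _ hx))
    · have hvy : v < y := lt_of_le_of_ne (hv y (List.mem_cons_self)) (Ne.symm hy)
      simp only [List.dropWhile_cons, beq_iff_eq, if_neg hy]
      intro x hx
      rcases List.mem_cons.mp hx with h | h
      · exact h ▸ hvy
      · exact lt_of_lt_of_le hvy (List.rel_of_pairwise_cons hs h)

-- takeWhile (== v) is a replicate of v
theorem pvTakeReplicate (v : Int) (xs : List Int) :
    xs.takeWhile (fun x => x == v) = List.replicate (xs.takeWhile (fun x => x == v)).length v := by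
  rw [List.eq_replicate_iff]
  exact ⟨rfl, fun x hx => by simpa using List.mem_takeWhile_imp hx⟩

-- the merge over runs of two sorted lists computes Σ_{a ∈ L} a * count(a, R)
theorem pvMergeSpec (L R : List Int) (hL : L.Pairwise (· ≤ ·)) (hR : R.Pairwise (· ≤ ·)) :
    mergeRuns L R = (L.map (fun a => a * (R.count a : Int))).sum := by
  fun_induction mergeRuns L R with
  | case1 R => simp
  | case2 a l => simp
  | case3 a l b r hab ih =>
    have hcount : (b :: r).count a = 0 := by
      rw [List.count_eq_zero]
      intro hmem
      rcases List.mem_cons.mp hmem with h | h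
      · omega
      · exact absurd (lt_of_lt_of_le hab (List.rel_of_pairwise_cons hR h)) (lt_irrefl a)
    rw [ih hL.tail hR]
    simp [hcount]
  | case4 a l b r hab hba ih =>
    rw [ih hL hR.tail]
    refine congrArg List.sum (List.map_congr_left (fun x hx => ?_))
    have hx' : a ≤ x := by
      rcases List.mem_cons.mp hx with h | h
      · exact h ▸ le_refl a
      · exact List.rel_of_pairwise_cons hL h
    have hxb : x ≠ b := by omega
    simp [List.count_cons]
    omega
  | case5 a l b r hab hba ih =>
    have heq : a = b := le_antisymm (not_lt.mp hba) (not_lt.mp hab)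
    subst heq
    set pL := fun x : Int => x == a with hpL
    set kL := ((a :: l).takeWhile pL).length with hkL
    set kR := ((a :: r).takeWhile pL).length with hkR
    set L' := (a :: l).dropWhile pL with hL'
    set R' := (a :: r).dropWhile pL with hR'
    have hgeL : ∀ x ∈ (a :: l), a ≤ x := by
      intro x hx
      rcases List.mem_cons.mp hx with h | h
      · exact h ▸ le_refl a
      · exact List.rel_of_pairwise_cons hL h
    have hgeR : ∀ x ∈ (a :: r), a ≤ x := by
      intro x hx
      rcases List.mem_cons.mp hx with h | h
      · exact h ▸ le_refl a
      · exact List.rel_of_pairwise_cons hR h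
    have hgtL : ∀ x ∈ L', a < x := pvDropGt a _ hL hgeL
    have hgtR : ∀ x ∈ R', a < x := pvDropGt a _ hR hgeR
    have hsplitR : (a :: r) = List.replicate kR a ++ R' := by
      conv_lhs => rw [← List.takeWhile_append_dropWhile (p := pL) (l := a :: r)]
      rw [← pvTakeReplicate]
    have hcountA : (a :: r).count a = kR := by
      rw [hsplitR, List.count_append, List.count_replicate_self, List.count_eq_zero.mpr]
      · omega
      · intro hmem; exact absurd (hgtR a hmem) (lt_irrefl a)
    have hIH : mergeRuns L' R' = (L'.map (fun x => x * (R'.count x : Int))).sum := by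
      exact ih (hL.sublist (List.dropWhile_sublist _)) (hR.sublist (List.dropWhile_sublist _))
    have hsplitL : (a :: l) = List.replicate kL a ++ L' := by
      conv_lhs => rw [← List.takeWhile_append_dropWhile (p := pL) (l := a :: l)]
      rw [← pvTakeReplicate]
    have hcountL' : ∀ x ∈ L', (a :: r).count x = R'.count x := by
      intro x hx
      have hax : a < x := hgtL x hx
      rw [hsplitR, List.count_append]
      have hz : List.count x (List.replicate kR a) = 0 := by
        rw [List.count_replicate]
        simp
        intro h
        omega
      rw [hz]; simp
    conv_rhs => rw [hsplitL]
    rw [List.map_append, List.sum_append, List.map_replicate, List.sum_replicate]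
    rw [hIH]
    have hmapL' : L'.map (fun x => x * (R'.count x : Int))
        = L'.map (fun x => x * (((a :: r).count x : Int))) := by
      refine List.map_congr_left (fun x hx => ?_)
      rw [hcountL' x hx]
    rw [hmapL', hcountA]
    ring

theorem pvMain (s : String) : compute s = compute_alt s := by
  unfold compute compute_alt
  rw [pvFoldA, pvFoldB]
  simp only [List.nil_append]
  set L := (pvPairs (PySem.Str.splitlines s)).map Prod.fst with hdefL
  set R := (pvPairs (PySem.Str.splitlines s)).map Prod.snd with hdefR
  have hA : L.foldl (fun total locId => total + locId *
      ((R.foldl (fun d b => d.modify b 0 (· + 1)) (PySem.Dict.empty : PySem.Dict Int Int)).getD locId 0)) 0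
      = (L.map (fun a => a * (R.count a : Int))).sum := by
    rw [PySem.List.foldl_add]
    simp [pvCountA]
  rw [hA, pvMergeSpec _ _ (PySem.List.sorted_pairwise ..) (PySem.List.sorted_pairwise ..)]
  have hpermL : (PySem.List.sorted L (fun x => x) false).Perm L := PySem.List.sorted_perm ..
  have hpermR : (PySem.List.sorted R (fun x => x) false).Perm R := PySem.List.sorted_perm ..
  have hcount : ((PySem.List.sorted L (fun x => x) false).map
      (fun a => a * (((PySem.List.sorted R (fun x => x) false).count a : Int))))
      = ((PySem.List.sorted L (fun x => x) false).map (fun a => a * (R.count a : Int))) := by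
    refine List.map_congr_left (fun a _ => ?_)
    rw [hpermR.count_eq]
  rw [hcount]
  exact ((hpermL.map (fun a => a * (R.count a : Int))).sum_eq).symm

-- ===== VERDICT (by name: the statement is the Claim_ definition above) =====
theorem compute_spec : Claim_equal_compute := by
  intro s _ _
  unfold Spec_compute
  exact pvMain s
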